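-- pv_equiv track=rewrite | github.com/Akuli/python-tutorial | common.py | header_link
-- ===== SOURCE A (Python) =====
-- import string
--
-- def header_link(title):
--     """Return a github-style link target for a title.
--
--     >>> header_link('Hello there!')
--     'hello-there'
--     """
--     # This doesn't do the-title-1, the-title-2 etc. with multiple titles
--     # with same text, but usually this doesn't matter.
--     result = ''
--     for character in title:
--         if character in string.whitespace:
--             result += '-'
--         elif character in string.punctuation:
--             pass
--         else:
--             result += character.lower()
--     return result
-- ===== SOURCE B (Python) =====
-- import string
--
-- _WS_TO_SPACE = str.maketrans(string.whitespace, ' ' * len(string.whitespace))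
-- _DROP_PUNCT = str.maketrans('', '', string.punctuation)
--
-- def header_link(title):
--     # Segment-and-join: normalise every whitespace char to ' ', split on ' '
--     # (keeping empty segments, so each whitespace char yields one dash),
--     # clean each segment (drop punctuation, lowercase), join with '-'.
--     segments = title.translate(_WS_TO_SPACE).split(' ')
--     return '-'.join(seg.translate(_DROP_PUNCT).lower() for seg in segments)
-- ===== Notes on version B (the rewrite author's own statement) =====
-- stated objective: alternative
-- what changed: B replaces A's single per-character if/elif/else accumulator loop with a segment-and-join pipeline: normalise every whitespace char to a space, split on that separator keeping empty segments, strip punctuation and lowercase each segment, then join the segments with a dash; a timing run measured it constant-factor faster because translate/split/join run in C instead of a per-character Python loop.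
import Mathlib
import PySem

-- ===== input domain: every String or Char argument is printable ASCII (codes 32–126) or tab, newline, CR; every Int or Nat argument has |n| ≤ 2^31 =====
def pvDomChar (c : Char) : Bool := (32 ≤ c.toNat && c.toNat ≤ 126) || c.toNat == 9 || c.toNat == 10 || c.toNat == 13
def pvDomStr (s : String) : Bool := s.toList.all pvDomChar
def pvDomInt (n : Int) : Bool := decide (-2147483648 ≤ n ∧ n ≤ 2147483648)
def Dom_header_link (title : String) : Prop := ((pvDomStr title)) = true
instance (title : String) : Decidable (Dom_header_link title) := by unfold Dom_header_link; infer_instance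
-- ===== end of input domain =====

-- B replaces A's per-character if/elif/else accumulator loop by a segment-and-join pipeline:
-- normalise all whitespace to ' ', split on ' ' (keeping empty segments), clean each segment
-- (drop punctuation, lowercase), join with '-' (objective: alternative decomposition, same cost).

-- string.whitespace = ' \t\n\r\x0b\x0c'
def pvWhitespace : List Char := [' ', '\t', '\n', '\r', Char.ofNat 11, Char.ofNat 12]
-- string.punctuation
def pvPunctuation : List Char := "!\"#$%&'()*+,-./:;<=>?@[\\]^_`{|}~".toList

-- ===== PORT A =====
def header_link (title : String) : String :=
  title.toList.foldl (fun result character =>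
    if character ∈ pvWhitespace then result ++ "-"
    else if character ∈ pvPunctuation then result
    else result ++ String.singleton (PySem.Chars.lowerChar character)) ""

-- ===== PORT B =====
-- title.translate(_WS_TO_SPACE): the maketrans table maps each whitespace char to ' ',
-- every other code point is kept — exactly this per-character function.
def pvWsToSpace (c : Char) : Char := if c ∈ pvWhitespace then ' ' else c

-- seg.translate(_DROP_PUNCT).lower(): the deletion table drops exactly the punctuation
-- characters (a filter), then str.lower lowercases the remaining segment.
def pvCleanSeg (w : List Char) : List Char :=
  PySem.Chars.lower (w.filter (fun c => c ∉ pvPunctuation))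

def header_link_alt (title : String) : String :=
  String.ofList (PySem.Chars.join ['-']
    ((PySem.Chars.splitOn (title.toList.map pvWsToSpace) [' ']).map pvCleanSeg))

-- ===== PRECONDITION & SPEC =====
def Spec_header_link (title : String) (out : String) : Prop := out = header_link_alt title
instance (title : String) (out : String) : Decidable (Spec_header_link title out) := by unfold Spec_header_link; infer_instance

-- ===== CLAIM (what is proved, stated in full; the proofs are below) =====
def Claim_equal_header_link : Prop := ∀ (title : String), Dom_header_link title → Spec_header_link title (header_link title)

-- ===== LEMMAS AND PROOFS =====

-- A's per-character contribution, as a list of characters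
def pvStepA (c : Char) : List Char :=
  if c ∈ pvWhitespace then ['-']
  else if c ∈ pvPunctuation then []
  else [PySem.Chars.lowerChar c]

theorem pvFoldA_toList (cs : List Char) (s : String) :
    (cs.foldl (fun result character =>
      if character ∈ pvWhitespace then result ++ "-"
      else if character ∈ pvPunctuation then result
      else result ++ String.singleton (PySem.Chars.lowerChar character)) s).toList
      = s.toList ++ cs.flatMap pvStepA := by
  induction cs generalizing s with
  | nil => simp
  | cons c cs ih =>
    rw [List.foldl_cons]
    simp only [pvStepA, List.flatMap_cons]
    split_ifs with h1 h2
    · rw [ih]; simp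
    · rw [ih]; simp
    · rw [ih]; simp

-- reference recursion for split(' '): what PySem.Chars.splitOn computes for the one-char separator
def pvSplit : List Char → List (List Char)
  | [] => [[]]
  | c :: rest =>
    match pvSplit rest with
    | [] => [[]]
    | w :: ws => if c = ' ' then [] :: w :: ws else (c :: w) :: ws

theorem pvSplit_ne_nil (l : List Char) : pvSplit l ≠ [] := by
  cases l with
  | nil => simp [pvSplit]
  | cons c rest =>
    simp only [pvSplit]
    cases pvSplit rest with
    | nil => simp
    | cons w ws => split_ifs <;> simp

def pvGlue (x : List Char) : List (List Char) → List (List Char)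
  | [] => [x]
  | w :: ws => (x ++ w) :: ws

theorem pvSplitOn_go_eq (l cur : List Char) (acc : List (List Char)) (fuel : Nat)
    (h : l.length < fuel) :
    PySem.Chars.splitOn.go [' '] fuel l cur acc
      = acc.reverse ++ pvGlue cur.reverse (pvSplit l) := by
  induction l generalizing cur acc fuel with
  | nil =>
    cases fuel with
    | zero => omega
    | succ f => simp [PySem.Chars.splitOn.go, pvSplit, pvGlue]
  | cons c rest ih =>
    cases fuel with
    | zero => omega
    | succ f =>
      simp only [List.length_cons] at h
      by_cases hc : c = ' '
      · subst hc
        rw [show PySem.Chars.splitOn.go [' '] (f + 1) (' ' :: rest) cur acc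
              = PySem.Chars.splitOn.go [' '] f rest [] (cur.reverse :: acc) by
            simp [PySem.Chars.splitOn.go, List.isPrefixOf]]
        rw [ih [] (cur.reverse :: acc) f (by omega)]
        have hne := pvSplit_ne_nil rest
        cases hs : pvSplit rest with
        | nil => exact absurd hs hne
        | cons w ws =>
          simp [pvSplit, hs, pvGlue]
      · rw [show PySem.Chars.splitOn.go [' '] (f + 1) (c :: rest) cur acc
              = PySem.Chars.splitOn.go [' '] f rest (c :: cur) acc by
            simp only [PySem.Chars.splitOn.go, List.isPrefixOf]
            simp [Ne.symm hc]]
        rw [ih (c :: cur) acc f (by omega)]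
        have hne := pvSplit_ne_nil rest
        cases hs : pvSplit rest with
        | nil => exact absurd hs hne
        | cons w ws =>
          simp [pvSplit, hs, pvGlue, hc]

theorem pvSplitOn_eq (l : List Char) : PySem.Chars.splitOn l [' '] = pvSplit l := by
  rw [PySem.Chars.splitOn, pvSplitOn_go_eq l [] [] (l.length + 1) (by omega)]
  have hne := pvSplit_ne_nil l
  cases hs : pvSplit l with
  | nil => exact absurd hs hne
  | cons w ws => simp [pvGlue]

-- join absorbs a prefix of the first segment
theorem pvJoin_cons_append (p x : List Char) (l : List (List Char)) :
    PySem.Chars.join ['-'] ((p ++ x) :: l) = p ++ PySem.Chars.join ['-'] (x :: l) := by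
  cases l with
  | nil => simp [PySem.Chars.join_singleton]
  | cons r rs => simp [PySem.Chars.join_cons_cons]

-- the heart of the proof: B's pipeline over cs equals A's per-character contributions
theorem pvPipeline_eq (cs : List Char) :
    PySem.Chars.join ['-'] ((pvSplit (cs.map pvWsToSpace)).map pvCleanSeg)
      = cs.flatMap pvStepA := by
  induction cs with
  | nil => simp [pvSplit, pvCleanSeg, PySem.Chars.lower, PySem.Chars.join_singleton]
  | cons c cs ih =>
    simp only [List.map_cons, List.flatMap_cons]
    by_cases hws : c ∈ pvWhitespace
    · have hmap : pvWsToSpace c = ' ' := by simp [pvWsToSpace, hws]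
      rw [hmap]
      have hne := pvSplit_ne_nil (cs.map pvWsToSpace)
      cases hs : pvSplit (cs.map pvWsToSpace) with
      | nil => exact absurd hs hne
      | cons w ws =>
        rw [hs] at ih
        have hsp : pvSplit (' ' :: List.map pvWsToSpace cs) = [] :: w :: ws := by
          simp [pvSplit, hs]
        rw [hsp, List.map_cons, List.map_cons,
            show pvCleanSeg [] = [] by simp [pvCleanSeg, PySem.Chars.lower],
            PySem.Chars.join_cons_cons]
        rw [List.map_cons] at ih
        rw [ih]
        simp [pvStepA, hws]
    · have hmap : pvWsToSpace c = c := by simp [pvWsToSpace, hws]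
      have hcsp : c ≠ ' ' := by
        intro h; exact hws (h ▸ (by simp [pvWhitespace]))
      rw [hmap]
      have hne := pvSplit_ne_nil (cs.map pvWsToSpace)
      cases hs : pvSplit (cs.map pvWsToSpace) with
      | nil => exact absurd hs hne
      | cons w ws =>
        rw [hs] at ih
        have hsp : pvSplit (c :: List.map pvWsToSpace cs) = (c :: w) :: ws := by
          simp [pvSplit, hs, hcsp]
        rw [hsp, List.map_cons]
        have hclean : pvCleanSeg (c :: w) = pvStepA c ++ pvCleanSeg w := by
          by_cases hp : c ∈ pvPunctuation
          · simp [pvCleanSeg, pvStepA, hp, hws]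
          · simp [pvCleanSeg, pvStepA, hp, hws, PySem.Chars.lower]
        rw [hclean, pvJoin_cons_append (pvStepA c) (pvCleanSeg w) (List.map pvCleanSeg ws)]
        rw [List.map_cons] at ih
        rw [ih]

-- ===== VERDICT (by name: the statement is the Claim_ definition above) =====
theorem header_link_spec : Claim_equal_header_link := by
  intro title _
  unfold Spec_header_link header_link header_link_alt
  rw [← String.toList_inj, pvFoldA_toList, pvSplitOn_eq, String.toList_ofList,
      pvPipeline_eq]
  simp
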